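-- pv_equiv track=rewrite | github.com/HyperSourceGithub/mathematical-drinking-devices | math.py | find_visited_cups
-- ===== SOURCE A (Python) =====
-- def find_visited_cups(start, end, n):
--     visited_order = []  # Track cups in the order they were visited
--     visited_set = set()  # Track cups that have been visited
--     current_position = start  # Start at the defined starting cup
--
--     # Loop until a cup is revisited (when it starts to repeat)
--     while current_position not in visited_set:
--         visited_order.append(current_position)  # Record the visit order
--         visited_set.add(current_position)  # Mark the current cup as visited
--
--         # Calculate the new position, wrapping around using modulo
--         current_position = start + ((current_position - start + n) % total_cups)
--
--     return visited_order
--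
-- total_cups = 120
-- ===== SOURCE B (Python) =====
-- import math
--
-- total_cups = 120
--
--
-- def find_visited_cups(start, end, n):
--     # Closed form: the visit offsets are (i*n) % total_cups, which first repeat
--     # after total_cups // gcd(n, total_cups) steps (gcd(0, 120) = 120 -> 1 step).
--     period = total_cups // math.gcd(n, total_cups)
--     return [start + (i * n) % total_cups for i in range(period)]
-- ===== Notes on version B (the rewrite author's own statement) =====
-- stated objective: simpler
-- what changed: Replaces the visited-set while-loop with runtime repeat detection by the closed-form cycle length total_cups // gcd(n, total_cups) and a direct list of offsets (i*n) % total_cups.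
import Mathlib
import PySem

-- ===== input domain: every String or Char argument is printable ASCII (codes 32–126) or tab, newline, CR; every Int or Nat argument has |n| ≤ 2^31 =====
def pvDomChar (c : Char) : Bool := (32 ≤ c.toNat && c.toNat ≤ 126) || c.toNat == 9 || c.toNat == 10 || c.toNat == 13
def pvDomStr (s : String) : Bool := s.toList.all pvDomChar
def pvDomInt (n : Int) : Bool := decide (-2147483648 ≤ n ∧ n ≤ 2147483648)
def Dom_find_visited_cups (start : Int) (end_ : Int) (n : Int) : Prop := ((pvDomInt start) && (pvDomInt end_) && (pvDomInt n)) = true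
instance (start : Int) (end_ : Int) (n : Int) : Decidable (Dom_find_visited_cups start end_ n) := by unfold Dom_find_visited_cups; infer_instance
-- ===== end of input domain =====

-- B replaces A's visited-set while-loop (runtime repeat detection) by the closed-form
-- cycle length total_cups // gcd(n, total_cups) and emits the offsets (i*n) % 120 directly
-- (objective: simpler).

-- ===== PORT A =====
-- A's while-loop as fuel recursion; fuel 121 always suffices: every position is
-- start + ((…) % 120), so at most 120 distinct values occur and the loop stops at the
-- first repeat (the equivalence proof shows the fuel-exhaustion branch is never reached).
def findLoopA (start n : Int) : Nat → Int → List Int → PySem.Set Int → List Int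
  | 0, _, order, _ => order
  | fuel+1, cur, order, vset =>
    if PySem.Set.contains vset cur then order
    else findLoopA start n fuel (start + PySem.Int.mod (cur - start + n) 120)
          (order ++ [cur]) (PySem.Set.add vset cur)

def find_visited_cups (start : Int) (end_ : Int) (n : Int) : List Int :=
  findLoopA start n 121 start [] PySem.Set.empty

-- ===== PORT B =====
def find_visited_cups_alt (start : Int) (end_ : Int) (n : Int) : List Int :=
  let period : Int := PySem.Int.floordiv 120 ((Int.gcd n 120 : Nat) : Int)
  (PySem.List.pyRange 0 period 1).map (fun i => start + PySem.Int.mod (i * n) 120)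

-- ===== PRECONDITION & SPEC =====
def Spec_find_visited_cups (start : Int) (end_ : Int) (n : Int) (out : List Int) : Prop := out = find_visited_cups_alt start end_ n
instance (start : Int) (end_ : Int) (n : Int) (out : List Int) : Decidable (Spec_find_visited_cups start end_ n out) := by unfold Spec_find_visited_cups; infer_instance

-- ===== CLAIM (what is proved, stated in full; the proofs are below) =====
def Claim_equal_find_visited_cups : Prop := ∀ (start : Int) (end_ : Int) (n : Int), Dom_find_visited_cups start end_ n → Spec_find_visited_cups start end_ n (find_visited_cups start end_ n)

-- ===== LEMMAS AND PROOFS =====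

-- A's loop expressed on offsets from `start` (proof-side mirror of findLoopA).
def loopOff (r : Int) : Nat → Int → List Int → PySem.Set Int → List Int
  | 0, _, order, _ => order
  | fuel+1, x, order, s =>
    if PySem.Set.contains s x then order
    else loopOff r fuel (PySem.Int.mod (x + r) 120) (order ++ [x]) (PySem.Set.add s x)

-- B's offset list.
def bcore (r : Int) : List Int :=
  (PySem.List.pyRange 0 (PySem.Int.floordiv 120 ((Int.gcd r 120 : Nat) : Int)) 1).map
    (fun i => PySem.Int.mod (i * r) 120)

-- the k-th visited offset
def pvF (R : Nat) (i : Nat) : Int := ((i * R) % 120 : Nat)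

lemma contains_map_add (start x : Int) (s : List Int) :
    PySem.Set.contains (s.map (fun y => start + y)) (start + x) = PySem.Set.contains s x := by
  by_cases h : x ∈ s
  · rw [(PySem.Set.contains_iff _ _).mpr (List.mem_map_of_mem h),
        (PySem.Set.contains_iff _ _).mpr h]
  · have h1 : start + x ∉ s.map (fun y => start + y) := by
      intro hm
      obtain ⟨a, ha, hax⟩ := List.mem_map.mp hm
      have : a = x := by omega
      exact h (this ▸ ha)
    rw [Bool.eq_false_iff.mpr (fun hc => h1 ((PySem.Set.contains_iff _ _).mp hc)),
        Bool.eq_false_iff.mpr (fun hc => h ((PySem.Set.contains_iff _ _).mp hc))]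

lemma loopA_shift (start n : Int) :
    ∀ (fuel : Nat) (x : Int) (l s : List Int),
      findLoopA start n fuel (start + x) (l.map (fun y => start + y)) (s.map (fun y => start + y))
        = (loopOff n fuel x l s).map (fun y => start + y) := by
  intro fuel
  induction fuel with
  | zero => intro x l s; simp [findLoopA, loopOff]
  | succ m ih =>
    intro x l s
    simp only [findLoopA, loopOff, contains_map_add]
    by_cases h : x ∈ s
    · rw [if_pos ((PySem.Set.contains_iff _ _).mpr h), if_pos ((PySem.Set.contains_iff _ _).mpr h)]
    · have hc : ¬ (PySem.Set.contains s x = true) := fun hc => h ((PySem.Set.contains_iff _ _).mp hc)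
      rw [if_neg hc, if_neg hc]
      have harg : start + x - start + n = x + n := by ring
      have hnm : start + x ∉ s.map (fun y => start + y) := by
        intro hm
        obtain ⟨a, ha, hax⟩ := List.mem_map.mp hm
        have : a = x := by omega
        exact h (this ▸ ha)
      rw [harg, PySem.Set.add_of_not_mem hnm, PySem.Set.add_of_not_mem h,
          show List.map (fun y => start + y) l ++ [start + x]
              = (l ++ [x]).map (fun y => start + y) by simp,
          show List.map (fun y => start + y) s ++ [start + x]
              = (s ++ [x]).map (fun y => start + y) by simp]
      exact ih (PySem.Int.mod (x + n) 120) (l ++ [x]) (s ++ [x])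

lemma loopOff_mod (n : Int) :
    ∀ (fuel : Nat) (x : Int) (l s : List Int),
      loopOff n fuel x l s = loopOff (PySem.Int.mod n 120) fuel x l s := by
  intro fuel
  induction fuel with
  | zero => intro x l s; simp [loopOff]
  | succ m ih =>
    intro x l s
    simp only [loopOff]
    have hstep : PySem.Int.mod (x + n) 120 = PySem.Int.mod (x + PySem.Int.mod n 120) 120 := by
      rw [PySem.Int.mod_eq_emod_of_pos (by norm_num), PySem.Int.mod_eq_emod_of_pos (by norm_num),
          PySem.Int.mod_eq_emod_of_pos (by norm_num)]
      omega
    rw [hstep]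
    by_cases h : PySem.Set.contains s x = true
    · rw [if_pos h, if_pos h]
    · rw [if_neg h, if_neg h]; exact ih _ _ _

-- 120 ∣ m*R  ↔  (120 / gcd R 120) ∣ m
lemma pvDvd (R m : Nat) : 120 ∣ m * R ↔ (120 / Nat.gcd R 120) ∣ m := by
  set g := Nat.gcd R 120 with hg
  have hg0 : 0 < g := Nat.gcd_pos_of_pos_right _ (by norm_num)
  have hgR : g ∣ R := Nat.gcd_dvd_left R 120
  have hg120 : g ∣ 120 := Nat.gcd_dvd_right R 120
  have h120 : 120 / g * g = 120 := Nat.div_mul_cancel hg120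
  have hR : R / g * g = R := Nat.div_mul_cancel hgR
  have hcop : Nat.Coprime (R / g) (120 / g) := Nat.coprime_div_gcd_div_gcd hg0
  constructor
  · intro h
    have h' : (120 / g) * g ∣ m * (R / g) * g := by
      rw [h120, mul_assoc, hR]; exact h
    have h2 : (120 / g) ∣ m * (R / g) := (Nat.mul_dvd_mul_iff_right hg0).mp h'
    exact Nat.Coprime.dvd_of_dvd_mul_right hcop.symm h2
  · intro h
    obtain ⟨c, hc⟩ := h
    exact ⟨c * (R / g), by
      calc m * R = (120 / g) * c * R := by rw [hc]
        _ = (120 / g) * (R / g * g) * c := by rw [hR]; ring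
        _ = (120 / g * g) * (R / g) * c := by ring
        _ = 120 * (c * (R / g)) := by rw [h120]; ring⟩

lemma pvP_pos (R : Nat) : 0 < 120 / Nat.gcd R 120 :=
  Nat.div_pos (Nat.le_of_dvd (by norm_num) (Nat.gcd_dvd_right R 120))
    (Nat.gcd_pos_of_pos_right _ (by norm_num))

lemma pvF_ne (R : Nat) {i j : Nat} (hij : i < j) (hj : j < 120 / Nat.gcd R 120) :
    pvF R i ≠ pvF R j := by
  intro h
  have h' : i * R % 120 = j * R % 120 := by
    unfold pvF at h; exact_mod_cast h
  have hle : i * R ≤ j * R := Nat.mul_le_mul_right _ (le_of_lt hij)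
  have hdvd : 120 ∣ j * R - i * R := (Nat.modEq_iff_dvd' hle).mp h'
  rw [← Nat.sub_mul] at hdvd
  have hp : (120 / Nat.gcd R 120) ∣ (j - i) := (pvDvd R (j - i)).mp hdvd
  have := Nat.le_of_dvd (by omega) hp
  omega

lemma pvF_period (R : Nat) : pvF R (120 / Nat.gcd R 120) = 0 := by
  unfold pvF
  have hdvd : 120 ∣ (120 / Nat.gcd R 120) * R := (pvDvd R _).mpr dvd_rfl
  simp [Nat.mod_eq_zero_of_dvd hdvd]

lemma loop_inv (R : Nat) : ∀ (fuel k : Nat), k ≤ 120 / Nat.gcd R 120 →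
    120 / Nat.gcd R 120 + 1 ≤ fuel + k →
    loopOff (R : Int) fuel (pvF R k) ((List.range k).map (pvF R)) ((List.range k).map (pvF R))
      = (List.range (120 / Nat.gcd R 120)).map (pvF R) := by
  intro fuel
  induction fuel with
  | zero => intro k hk hf; omega
  | succ m ih =>
    intro k hk hf
    rcases eq_or_lt_of_le hk with hkp | hkp
    · -- k = p : current offset repeats offset 0, loop stops
      have hp0 : 0 < k := hkp ▸ pvP_pos R
      have h0 : pvF R k = pvF R 0 := by
        rw [hkp, pvF_period]; unfold pvF; simp
      have hmem : pvF R k ∈ (List.range k).map (pvF R) := by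
        rw [h0]; exact List.mem_map_of_mem (List.mem_range.mpr hp0)
      simp only [loopOff]
      rw [if_pos ((PySem.Set.contains_iff _ _).mpr hmem), hkp]
    · -- k < p : current offset is new
      have hnot : pvF R k ∉ (List.range k).map (pvF R) := by
        intro hmem
        obtain ⟨i, hi, hif⟩ := List.mem_map.mp hmem
        exact pvF_ne R (List.mem_range.mp hi) hkp hif
      simp only [loopOff]
      rw [if_neg (fun hc => hnot ((PySem.Set.contains_iff _ _).mp hc))]
      have hx : PySem.Int.mod (pvF R k + (R : Int)) 120 = pvF R (k + 1) := by
        unfold pvF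
        rw [← Nat.cast_add, show (120 : Int) = ((120 : Nat) : Int) from rfl, PySem.Int.mod_natCast]
        rw [Nat.mod_add_mod, show k * R + R = (k + 1) * R by ring]
      have hord : (List.range k).map (pvF R) ++ [pvF R k] = (List.range (k + 1)).map (pvF R) := by
        rw [List.range_succ]; simp
      rw [hx, PySem.Set.add_of_not_mem hnot, hord]
      exact ih (k + 1) hkp (by omega)

lemma core (R : Nat) : loopOff (R : Int) 121 0 [] [] =
    (List.range (120 / Nat.gcd R 120)).map (pvF R) := by
  have hple : 120 / Nat.gcd R 120 ≤ 120 := Nat.div_le_self _ _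
  have h := loop_inv R 121 0 (Nat.zero_le _) (by omega)
  simpa [pvF] using h

lemma bcore_natCast (R : Nat) : bcore (R : Int) = (List.range (120 / Nat.gcd R 120)).map (pvF R) := by
  unfold bcore
  have hgcd : Int.gcd (R : Int) 120 = Nat.gcd R 120 := by
    simp [Int.gcd]
  rw [hgcd, show (120 : Int) = ((120 : Nat) : Int) from rfl, PySem.Int.floordiv_natCast,
      PySem.List.pyRange_zero_natCast, List.map_map]
  refine List.map_congr_left (fun j _ => ?_)
  simp only [Function.comp_apply, pvF]
  rw [← Nat.cast_mul, PySem.Int.mod_natCast]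

lemma gcd_emod_120 (n : Int) : Int.gcd (n % 120) 120 = Int.gcd n 120 := by
  apply Nat.dvd_antisymm
  · refine Int.dvd_gcd ?_ (Int.gcd_dvd_right ..)
    have h1 : (↑(Int.gcd (n % 120) 120) : Int) ∣ n % 120 := Int.gcd_dvd_left ..
    have h2 : (↑(Int.gcd (n % 120) 120) : Int) ∣ 120 := Int.gcd_dvd_right ..
    have hn : 120 * (n / 120) + n % 120 = n := Int.mul_ediv_add_emod n 120
    have h3 : (↑(Int.gcd (n % 120) 120) : Int) ∣ 120 * (n / 120) + n % 120 :=
      dvd_add (h2.mul_right _) h1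
    rwa [hn] at h3
  · refine Int.dvd_gcd ?_ (Int.gcd_dvd_right ..)
    have h1 : (↑(Int.gcd n 120) : Int) ∣ n := Int.gcd_dvd_left ..
    have h2 : (↑(Int.gcd n 120) : Int) ∣ 120 := Int.gcd_dvd_right ..
    have hm : n % 120 = n - 120 * (n / 120) := Int.emod_def n 120
    have h3 : (↑(Int.gcd n 120) : Int) ∣ n - 120 * (n / 120) := dvd_sub h1 (h2.mul_right _)
    rwa [← hm] at h3

lemma alt_eq_bcore (start end_ n : Int) :
    find_visited_cups_alt start end_ n = (bcore (PySem.Int.mod n 120)).map (fun y => start + y) := by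
  unfold find_visited_cups_alt bcore
  have hr : PySem.Int.mod n 120 = n % 120 := PySem.Int.mod_eq_emod_of_pos (by norm_num)
  have hgcd : Int.gcd n 120 = Int.gcd (PySem.Int.mod n 120) 120 := by
    rw [hr, gcd_emod_120]
  rw [List.map_map, ← hgcd]
  refine List.map_congr_left (fun i _ => ?_)
  simp only [Function.comp_apply]
  congr 1
  rw [hr, PySem.Int.mod_eq_emod_of_pos (by norm_num), PySem.Int.mod_eq_emod_of_pos (by norm_num),
      Int.mul_emod i n, Int.mul_emod i (n % 120), Int.emod_emod_of_dvd n dvd_rfl]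

-- ===== VERDICT (by name: the statement is the Claim_ definition above) =====
theorem find_visited_cups_spec : Claim_equal_find_visited_cups := by
  intro start end_ n _
  unfold Spec_find_visited_cups find_visited_cups
  have h0 : findLoopA start n 121 start [] PySem.Set.empty
      = findLoopA start n 121 (start + 0) (([] : List Int).map (fun y => start + y))
          (([] : List Int).map (fun y => start + y)) := by norm_num [PySem.Set.empty]
  rw [h0, loopA_shift, loopOff_mod, alt_eq_bcore]
  congr 1
  have hr0 : 0 ≤ PySem.Int.mod n 120 := PySem.Int.mod_nonneg n (by norm_num)
  have hm : PySem.Int.mod n 120 = ((PySem.Int.mod n 120).toNat : Int) := (Int.toNat_of_nonneg hr0).symm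
  rw [hm, core, bcore_natCast]
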